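-- pv_equiv track=rewrite | github.com/eset/nimfilt | nimfilt.py | demangle_function
-- ===== SOURCE A (Python) =====
-- import string
-- from binascii import unhexlify
--
-- SPECIAL_CHAR_CONVS = {
--     "dollar": "$",
--     "percent": "%",
--     "amp": "&",
--     "roof": "^",
--     "emark": "!",
--     "qmark": "?",
--     "star": "*",
--     "plus": "+",
--     "minus": "-",
--     "backslash": "\\",
--     "slash": "/",
--     "eq": "=",
--     "lt": "<",
--     "gt": ">",
--     "tilde": "~",
--     "colon": ":",
--     "dot": ".",
--     "at": "@",
--     "bar": "|"
-- }
--
-- def __decode_specialchar(substring):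
--     """
--     Finds first match of special character in substring.
--
--     :type substring: str
--
--     :return: First match and lenght of key
--     :rtype: Tuple[str, int]
--     """
--
--     try:
--         fnd_key = list(filter(lambda k: substring.startswith(k), SPECIAL_CHAR_CONVS.keys()))[0]
--         return SPECIAL_CHAR_CONVS[fnd_key], len(fnd_key)
--     except IndexError:
--         return substring[0], 1
--
-- def __Xsubstring(substring):
--     """
--     Parses a hex encoded substrings strings
--
--     :type substring: str
--
--     :return: The parsed value and length and hown many characters were parsed
--     :rtype: Tuple[str, int]
--     """
--
--     if len(substring) < 3:
--         return "X", 1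
--     elif all(map(lambda c: c in string.hexdigits.upper(), substring[1:3])):
--         return unhexlify(substring[1:3]).decode("utf-8"), 3
--     else:
--         return "X", 1
--
-- def demangle_function(name):
--     """
--     Demangles a function name.
--
--     See: https://github.com/nim-lang compiler/ccgutils.nim:mangle
--
--     :type name: str
--
--     :rtype: str
--     """
--
--     plain = ""
--     if name[-1] != "_":  # underscore is added at the end of the name if any special encoding had to be performed
--         if name[0] == "X":
--             name = name[1:]
--         return name
--
--     name = name[:-1]  # remove trailing _
--     i = 0
--     if name[0] == "X" and name[1] in string.digits and name[2] not in string.hexdigits.upper():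
--         plain = plain + name[1]
--         i = 2
--
--     while i < len(name):
--         if name[i] == "X":
--             v, ln = __Xsubstring(name[i:i + 3])
--             i += ln
--             plain = plain + v
--         elif name[i] in string.ascii_lowercase:
--             v, ln = __decode_specialchar(name[i:])
--             i += ln
--             plain = plain + v
--         else:
--             plain = plain + name[i]
--             i += 1
--
--     return plain
-- ===== SOURCE B (Python) =====
-- import re
-- import string
--
-- SPECIAL_CHAR_CONVS = {
--     "dollar": "$", "percent": "%", "amp": "&", "roof": "^", "emark": "!",
--     "qmark": "?", "star": "*", "plus": "+", "minus": "-", "backslash": "\\",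
--     "slash": "/", "eq": "=", "lt": "<", "gt": ">", "tilde": "~",
--     "colon": ":", "dot": ".", "at": "@", "bar": "|"
-- }
--
-- # One regex alternation drives the same left-to-right parse: a valid hex escape
-- # first, then the special-word keys in dict order (= first-match order), then
-- # any single character as itself.
-- _TOKEN_RE = re.compile("X[0-9A-F]{2}|" + "|".join(SPECIAL_CHAR_CONVS) + "|.", re.DOTALL)
--
-- def _expand(m):
--     tok = m.group(0)
--     if len(tok) == 3 and tok[0] == "X":
--         return chr(int(tok[1:], 16))
--     if tok in SPECIAL_CHAR_CONVS:
--         return SPECIAL_CHAR_CONVS[tok]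
--     return tok
--
-- def demangle_function(name):
--     if name[-1] != "_":
--         return name[1:] if name[0] == "X" else name
--     name = name[:-1]
--     prefix = ""
--     if name[0] == "X" and name[1] in string.digits and name[2] not in string.hexdigits.upper():
--         prefix, name = name[1], name[2:]
--     return prefix + _TOKEN_RE.sub(_expand, name)
-- ===== Notes on version B (the rewrite author's own statement) =====
-- stated objective: idiomatic
-- what changed: B keeps the trailing-underscore gate and the X<digit> prefix case but replaces A's explicit index loop with its three-way branch chain and per-branch helper functions by a single compiled regex alternation (X-hex escape | special-word keys in dict order | any single char) expanded via one re.sub callback.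
import Mathlib
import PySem

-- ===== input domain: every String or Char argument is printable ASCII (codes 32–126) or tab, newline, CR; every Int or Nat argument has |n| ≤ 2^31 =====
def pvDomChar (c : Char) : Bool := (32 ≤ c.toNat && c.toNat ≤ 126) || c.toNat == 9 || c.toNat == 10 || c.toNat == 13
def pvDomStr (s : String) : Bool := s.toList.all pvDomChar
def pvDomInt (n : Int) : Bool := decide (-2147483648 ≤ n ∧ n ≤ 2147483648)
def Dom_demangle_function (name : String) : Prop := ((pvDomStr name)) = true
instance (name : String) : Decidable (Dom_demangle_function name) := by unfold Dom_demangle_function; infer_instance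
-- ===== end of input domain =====

-- B rewrites A's explicit index loop as a single regex-style alternation pass (idiomatic); same values everywhere A returns.

-- shared module-level context (SPECIAL_CHAR_CONVS, string.*, unhexlify+decode)
def pvConvs : List (List Char × Char) :=
  [("dollar".toList, '$'), ("percent".toList, '%'), ("amp".toList, '&'),
   ("roof".toList, '^'), ("emark".toList, '!'), ("qmark".toList, '?'),
   ("star".toList, '*'), ("plus".toList, '+'), ("minus".toList, '-'),
   ("backslash".toList, '\\'), ("slash".toList, '/'), ("eq".toList, '='),
   ("lt".toList, '<'), ("gt".toList, '>'), ("tilde".toList, '~'),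
   ("colon".toList, ':'), ("dot".toList, '.'), ("at".toList, '@'),
   ("bar".toList, '|')]

def pvDigits : List Char := "0123456789".toList            -- string.digits
def pvHexU : List Char := "0123456789ABCDEF".toList        -- string.hexdigits.upper() (duplicate letters dropped; membership identical)
def pvLowercase : List Char := "abcdefghijklmnopqrstuvwxyz".toList  -- string.ascii_lowercase
def pvHexVal (c : Char) : Nat := if c ≤ '9' then c.toNat - 48 else c.toNat - 55
-- unhexlify(bd).decode("utf-8"): exact for byte values < 0x80; Python raises UnicodeDecodeError
-- for larger values, which Pre_ excludes (pvNoBadX), so the total extension is never relied on.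
def pvUnhex2 (b d : Char) : Char := Char.ofNat (16 * pvHexVal b + pvHexVal d)

-- ===== PORT A =====
-- __decode_specialchar: first dict key that is a prefix of the suffix, else (substring[0], 1)
def pvDecodeSpecialA (sub : List Char) (ks : List (List Char × Char)) : List Char × Nat :=
  match ks with
  | [] => (sub.take 1, 1)
  | (k, v) :: rest => if k.isPrefixOf sub then ([v], k.length) else pvDecodeSpecialA sub rest

-- __Xsubstring on name[i:i+3] (defaults of getD are unreachable behind the length test)
def pvXsubA (sub : List Char) : List Char × Nat :=
  if sub.length < 3 then (['X'], 1)
  else if sub.getD 1 ' ' ∈ pvHexU ∧ sub.getD 2 ' ' ∈ pvHexU then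
    ([pvUnhex2 (sub.getD 1 ' ') (sub.getD 2 ' ')], 3)
  else (['X'], 1)

-- the while-loop of demangle_function, as recursion on the suffix name[i:]
def pvLoopA : List Char → List Char
  | [] => []
  | c :: rest =>
    if c = 'X' then
      let p := pvXsubA (List.take 3 (c :: rest))
      p.1 ++ pvLoopA (List.drop (p.2 - 1) rest)
    else if c ∈ pvLowercase then
      let p := pvDecodeSpecialA (c :: rest) pvConvs
      p.1 ++ pvLoopA (List.drop (p.2 - 1) rest)
    else
      c :: pvLoopA rest
termination_by l => l.length
decreasing_by all_goals (simp [List.length_drop]; try omega)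

-- indexing via headD/getD: the defaults are only reached where Python raises IndexError (outside Pre_)
def demangle_function (name : String) : String :=
  match name.toList.getLast? with
  | none => name            -- Python raises IndexError on "" (outside Pre_)
  | some last =>
    if last ≠ '_' then
      if name.toList.headD ' ' = 'X' then String.ofList (name.toList.drop 1) else name
    else
      let m := name.toList.dropLast
      if m.headD ' ' = 'X' ∧ m.getD 1 ' ' ∈ pvDigits ∧ m.getD 2 ' ' ∉ pvHexU then
        String.ofList (m.getD 1 ' ' :: pvLoopA (m.drop 2))   -- plain = name[1], loop from i = 2
      else
        String.ofList (pvLoopA m)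

-- ===== PORT B =====
-- the regex alternation "X[0-9A-F]{2}|<keys in dict order>|." matched at one position:
-- key alternatives tried in order, catch-all "." last
def pvFindTokB : List (List Char × Char) → List Char → List Char × Nat
  | [], l => (l.take 1, 1)
  | (k, v) :: ks, l => if k.isPrefixOf l then ([v], k.length) else pvFindTokB ks l

-- first alternative: "X" plus exactly two uppercase hex digits, expanded by the callback
def pvMatchAltB (l : List Char) : List Char × Nat :=
  if l.headD ' ' = 'X' ∧ 3 ≤ l.length ∧ l.getD 1 ' ' ∈ pvHexU ∧ l.getD 2 ' ' ∈ pvHexU then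
    ([pvUnhex2 (l.getD 1 ' ') (l.getD 2 ' ')], 3)
  else pvFindTokB pvConvs l

-- re.sub: repeat the leftmost-position match over the rest of the string
def pvSubB : List Char → List Char
  | [] => []
  | c :: rest =>
    let p := pvMatchAltB (c :: rest)
    p.1 ++ pvSubB (List.drop (p.2 - 1) rest)
termination_by l => l.length
decreasing_by all_goals (simp [List.length_drop]; try omega)

def demangle_function_alt (name : String) : String :=
  match name.toList.getLast? with
  | none => name            -- Python raises IndexError on "" (outside Pre_)
  | some last =>
    if last = '_' then
      let m := name.toList.dropLast
      -- prefix, name = name[1], name[2:]  when the X<digit><non-hex> case fires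
      let pr : List Char × List Char :=
        if m.headD ' ' = 'X' ∧ m.getD 1 ' ' ∈ pvDigits ∧ m.getD 2 ' ' ∉ pvHexU then
          ([m.getD 1 ' '], m.drop 2)
        else ([], m)
      String.ofList (pr.1 ++ pvSubB pr.2)
    else
      if name.toList.headD ' ' = 'X' then String.ofList (name.toList.drop 1) else name

-- ===== PRECONDITION & SPEC =====
-- scan for "X" followed by two uppercase hex digits whose byte value is ≥ 0x80
-- (first digit in "89ABCDEF"): exactly there unhexlify(..).decode("utf-8") raises
def pvHighHex : List Char := "89ABCDEF".toList
def pvNoBadX : List Char → Bool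
  | c :: b :: d :: rest =>
      if c = 'X' ∧ b ∈ pvHighHex ∧ d ∈ pvHexU then false else pvNoBadX (b :: d :: rest)
  | _ => true

-- Pre_ excludes exactly the inputs on which Python A raises: the empty string (IndexError on
-- name[-1]), names ending in "_" whose stripped body is empty or starts with "X" with too few
-- following characters for the X<digit> prefix test (IndexError), and stripped bodies containing
-- an X-escape that decodes to a byte ≥ 0x80 (UnicodeDecodeError).
def Pre_demangle_function (name : String) : Prop :=
  name.toList ≠ [] ∧
  (name.toList.getLast? = some '_' →
    (name.toList.dropLast ≠ [] ∧
     (name.toList.dropLast.headD ' ' = 'X' → 2 ≤ name.toList.dropLast.length) ∧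
     ((name.toList.dropLast.headD ' ' = 'X' ∧ name.toList.dropLast.getD 1 ' ' ∈ pvDigits) →
        3 ≤ name.toList.dropLast.length) ∧
     pvNoBadX name.toList.dropLast = true))
instance (name : String) : Decidable (Pre_demangle_function name) := by
  unfold Pre_demangle_function; infer_instance

def pvWitness_demangle_function : String := "XdollarX41_"

def Spec_demangle_function (name : String) (out : String) : Prop := out = demangle_function_alt name
instance (name : String) (out : String) : Decidable (Spec_demangle_function name out) := by
  unfold Spec_demangle_function; infer_instance

-- ===== CLAIM (what is proved, stated in full; the proofs are below) =====
def Claim_equal_demangle_function : Prop := ∀ (name : String), Dom_demangle_function name → Pre_demangle_function name → Spec_demangle_function name (demangle_function name)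

-- ===== LEMMAS AND PROOFS =====

theorem pvLoopA_nil : pvLoopA [] = [] := by rw [pvLoopA]

theorem pvLoopA_cons (c : Char) (rest : List Char) :
    pvLoopA (c :: rest) =
      if c = 'X' then
        (pvXsubA (List.take 3 (c :: rest))).1 ++
          pvLoopA (List.drop ((pvXsubA (List.take 3 (c :: rest))).2 - 1) rest)
      else if c ∈ pvLowercase then
        (pvDecodeSpecialA (c :: rest) pvConvs).1 ++
          pvLoopA (List.drop ((pvDecodeSpecialA (c :: rest) pvConvs).2 - 1) rest)
      else c :: pvLoopA rest := by
  rw [pvLoopA]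

theorem pvSubB_nil : pvSubB [] = [] := by rw [pvSubB]

theorem pvSubB_cons (c : Char) (rest : List Char) :
    pvSubB (c :: rest) =
      (pvMatchAltB (c :: rest)).1 ++
        pvSubB (List.drop ((pvMatchAltB (c :: rest)).2 - 1) rest) := by
  rw [pvSubB]

-- A's per-key scan and B's per-alternative scan are the same fold over the key list
theorem pv_decode_eq (ks : List (List Char × Char)) (l : List Char) :
    pvDecodeSpecialA l ks = pvFindTokB ks l := by
  induction ks with
  | nil => rfl
  | cons kv ks ih => cases kv; simp [pvDecodeSpecialA, pvFindTokB, ih]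

-- no key (all of which start with a lowercase letter) matches at a non-lowercase character,
-- so the "." alternative fires
theorem pv_findTok_no_match (ks : List (List Char × Char)) (c : Char) (rest : List Char)
    (hks : ∀ kv ∈ ks, kv.1.headD 'A' ∈ pvLowercase) (hc : c ∉ pvLowercase) :
    pvFindTokB ks (c :: rest) = ([c], 1) := by
  induction ks with
  | nil => simp [pvFindTokB]
  | cons kv ks ih =>
    obtain ⟨k, v⟩ := kv
    have hk : k.headD 'A' ∈ pvLowercase := hks (k, v) List.mem_cons_self
    cases k with
    | nil => exact absurd hk (by decide)
    | cons a t =>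
      have hne : ¬ (List.isPrefixOf (a :: t) (c :: rest) = true) := by
        simp only [List.isPrefixOf, Bool.and_eq_true, beq_iff_eq]
        rintro ⟨rfl, -⟩
        exact hc (by simpa using hk)
      simp only [pvFindTokB, if_neg hne]
      exact ih (fun kv hkv => hks kv (List.mem_cons_of_mem _ hkv))

theorem pv_convs_heads : ∀ kv ∈ pvConvs, kv.1.headD 'A' ∈ pvLowercase := by decide

theorem pv_matchAlt_not_X (c : Char) (rest : List Char) (hc : c ≠ 'X') :
    pvMatchAltB (c :: rest) = pvFindTokB pvConvs (c :: rest) := by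
  unfold pvMatchAltB
  rw [if_neg]
  intro h
  exact hc (by simpa using h.1)

theorem pv_loop_eq (l : List Char) : pvLoopA l = pvSubB l := by
  have H : ∀ n (l : List Char), l.length ≤ n → pvLoopA l = pvSubB l := by
    intro n
    induction n with
    | zero =>
      intro l h
      have hl : l = [] := List.eq_nil_of_length_eq_zero (Nat.le_zero.mp h)
      rw [hl, pvLoopA_nil, pvSubB_nil]
    | succ n ih =>
      intro l h
      match l with
      | [] => rw [pvLoopA_nil, pvSubB_nil]
      | c :: rest =>
        have hr : rest.length ≤ n := by simpa using h
        rw [pvLoopA_cons, pvSubB_cons]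
        by_cases hX : c = 'X'
        · subst hX
          rw [if_pos rfl]
          match rest with
          | [] =>
            rw [show pvXsubA (List.take 3 ['X']) = (['X'], 1) from by decide]
            rw [show pvMatchAltB ['X'] = pvFindTokB pvConvs ['X'] from by
              unfold pvMatchAltB; rw [if_neg]; rintro ⟨-, h3, -⟩; simp at h3]
            rw [pv_findTok_no_match _ _ _ pv_convs_heads (by decide)]
            simp [ih [] (by simpa using hr)]
          | [b] =>
            rw [show pvXsubA (List.take 3 ['X', b]) = (['X'], 1) from by
              unfold pvXsubA; rw [if_pos]; simp]
            rw [show pvMatchAltB ['X', b] = pvFindTokB pvConvs ['X', b] from by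
              unfold pvMatchAltB; rw [if_neg]; rintro ⟨-, h3, -⟩; simp at h3]
            rw [pv_findTok_no_match _ _ _ pv_convs_heads (by decide)]
            simp [ih [b] hr]
          | b :: d :: t =>
            by_cases hhex : b ∈ pvHexU ∧ d ∈ pvHexU
            · rw [show pvXsubA (List.take 3 ('X' :: b :: d :: t)) = ([pvUnhex2 b d], 3) from by
                unfold pvXsubA
                rw [if_neg (by simp), if_pos (by simpa [List.getD] using hhex)]
                simp [List.getD]]
              rw [show pvMatchAltB ('X' :: b :: d :: t) = ([pvUnhex2 b d], 3) from by
                unfold pvMatchAltB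
                rw [if_pos ⟨by simp, by simp, by simpa [List.getD] using hhex.1,
                             by simpa [List.getD] using hhex.2⟩]
                simp [List.getD]]
              have ht : t.length ≤ n := by simp at hr; omega
              simp [ih t ht]
            · rw [show pvXsubA (List.take 3 ('X' :: b :: d :: t)) = (['X'], 1) from by
                unfold pvXsubA
                rw [if_neg (by simp), if_neg (by simpa [List.getD] using hhex)]]
              rw [show pvMatchAltB ('X' :: b :: d :: t) = pvFindTokB pvConvs ('X' :: b :: d :: t) from by
                unfold pvMatchAltB
                rw [if_neg]
                rintro ⟨-, -, h1, h2⟩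
                exact hhex ⟨by simpa [List.getD] using h1, by simpa [List.getD] using h2⟩]
              rw [pv_findTok_no_match _ _ _ pv_convs_heads (by decide)]
              simp [ih (b :: d :: t) hr]
        · rw [if_neg hX, pv_matchAlt_not_X c rest hX]
          by_cases hlow : c ∈ pvLowercase
          · rw [if_pos hlow, pv_decode_eq]
            exact congrArg _ (ih _ (le_trans (by simp) hr))
          · rw [if_neg hlow, pv_findTok_no_match _ _ _ pv_convs_heads hlow]
            simp [ih rest hr]
  exact H l.length l le_rfl

-- ===== VERDICT (by name: the statement is the Claim_ definition above) =====
theorem demangle_function_spec : Claim_equal_demangle_function := by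
  intro name _ _
  unfold Spec_demangle_function demangle_function demangle_function_alt
  cases hl : name.toList.getLast? with
  | none => rfl
  | some c =>
    by_cases hc : c = '_'
    · subst hc
      simp only [ne_eq, not_true_eq_false, if_false]
      simp only [pv_loop_eq]
      split_ifs with hpre
      · simp
      · simp
    · simp [hc]
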